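-- pv_equiv track=rewrite | github.com/achen2289/UCLA-CS-131 | project/server.py | get_lat_and_long
-- ===== SOURCE A (Python) =====
-- def get_lat_and_long(location):
--     signs = []
--     for i, coord in enumerate(location):
--         if coord == "+" or coord == "-":
--             signs.append(i)
--
--     if len(signs) != 2:
--         return None
--
--     if 0 not in signs or (len(location) - 1) in signs:
--         return None
--
--     sign_0, sign_1 = signs
--     latitude = location[sign_0 : sign_1]
--     longitude = location[sign_1:]
--
--     return latitude, longitude
-- ===== SOURCE B (Python) =====
-- def _first_sign(s):
--     """Index of the first '+' or '-' in s, or -1 if there is none."""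
--     for k, c in enumerate(s):
--         if c == "+" or c == "-":
--             return k
--     return -1
--
--
-- def get_lat_and_long(location):
--     # latitude must start with a sign at index 0
--     if not location or (location[0] != "+" and location[0] != "-"):
--         return None
--     k = _first_sign(location[1:])  # the second sign sits at index k + 1
--     if k == -1:
--         return None
--     lat, lon = location[:k + 1], location[k + 1:]
--     # longitude needs a digit after its sign, and no third sign may follow
--     if len(lon) < 2 or _first_sign(lon[1:]) != -1:
--         return None
--     return lat, lon
-- ===== Notes on version B (the rewrite author's own statement) =====
-- stated objective: alternative
-- what changed: Instead of collecting the list of all sign indices and validating it afterwards, B finds the first sign of the tail directly, splits the string there, and rejects early if the sign is missing, the longitude piece is degenerate, or a further sign follows.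
import Mathlib
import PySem

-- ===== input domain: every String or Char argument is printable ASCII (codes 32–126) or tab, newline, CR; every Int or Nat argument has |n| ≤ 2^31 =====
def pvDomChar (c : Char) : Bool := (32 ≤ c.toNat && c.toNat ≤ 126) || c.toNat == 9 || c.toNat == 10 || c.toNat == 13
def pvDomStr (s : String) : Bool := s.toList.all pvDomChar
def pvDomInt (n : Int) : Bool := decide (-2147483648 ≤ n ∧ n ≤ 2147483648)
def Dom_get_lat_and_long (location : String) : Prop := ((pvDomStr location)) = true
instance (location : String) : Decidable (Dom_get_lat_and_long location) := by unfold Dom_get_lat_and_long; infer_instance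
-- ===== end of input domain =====

-- B replaces A's collect-all-sign-indices-then-validate pass by a direct split at the first sign of the tail (alternative decomposition, same cost).


-- ===== PORT A =====
def get_lat_and_long (location : String) : Option (String × String) :=
  let signs : List Int := (PySem.List.enumerate location.toList 0).foldl
    (fun acc p => if p.2 == '+' || p.2 == '-' then acc ++ [p.1] else acc) []
  if signs.length ≠ 2 then none
  else if (0 : Int) ∉ signs ∨ (PySem.Str.len location - 1) ∈ signs then none
  else match signs with
    | [sign_0, sign_1] =>
        some (PySem.Str.slice location (some sign_0) (some sign_1),
              PySem.Str.slice location (some sign_1) none)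
    | _ => none  -- unreachable: the first guard ensures len(signs) == 2

-- ===== PORT B =====
-- _first_sign ported by hand on code points: the indexed loop with early return becomes the obvious structural recursion (exact: returns the enumerate index of the first sign, -1 if none)
def firstSign : List Char → Int
  | [] => -1
  | c :: cs =>
      if c == '+' || c == '-' then 0
      else
        let r := firstSign cs
        if r = -1 then -1 else r + 1

def get_lat_and_long_alt (location : String) : Option (String × String) :=
  match location.toList with   -- 'not location' / 'location[0]'
  | [] => none
  | c :: _ =>
      if c ≠ '+' ∧ c ≠ '-' then none
      else
        let k := firstSign (PySem.Str.slice location (some 1) none).toList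
        if k = -1 then none
        else
          let lat := PySem.Str.slice location none (some (k + 1))
          let lon := PySem.Str.slice location (some (k + 1)) none
          if PySem.Str.len lon < 2 ∨ firstSign (PySem.Str.slice lon (some 1) none).toList ≠ -1 then none
          else some (lat, lon)

-- ===== PRECONDITION & SPEC =====
def Spec_get_lat_and_long (location : String) (out : Option (String × String)) : Prop := out = get_lat_and_long_alt location
instance (location : String) (out : Option (String × String)) : Decidable (Spec_get_lat_and_long location out) := by unfold Spec_get_lat_and_long; infer_instance

-- ===== CLAIM (what is proved, stated in full; the proofs are below) =====
def Claim_equal_get_lat_and_long : Prop := ∀ (location : String), Dom_get_lat_and_long location → Spec_get_lat_and_long location (get_lat_and_long location)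

-- ===== LEMMAS AND PROOFS =====

-- the indices (counted from s) of the sign characters of cs, in order: what A's loop collects
def sidx (cs : List Char) (s : Int) : List Int :=
  ((PySem.List.enumerate cs s).filter (fun p => p.2 == '+' || p.2 == '-')).map (·.1)

theorem sidx_nil (s : Int) : sidx [] s = [] := by
  simp [sidx, PySem.List.enumerate_nil]

theorem sidx_cons (c : Char) (cs : List Char) (s : Int) :
    sidx (c :: cs) s = (if c == '+' || c == '-' then [s] else []) ++ sidx cs (s + 1) := by
  simp only [sidx, PySem.List.enumerate_cons, List.filter_cons]
  split <;> simp_all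

theorem mem_sidx_le {cs : List Char} {s i : Int} (h : i ∈ sidx cs s) : s ≤ i := by
  induction cs generalizing s with
  | nil => simp [sidx_nil] at h
  | cons c cs ih =>
      rw [sidx_cons] at h
      rcases List.mem_append.mp h with h | h
      · split at h <;> simp_all
      · have := ih h; omega

theorem firstSign_cases (cs : List Char) :
    firstSign cs = -1 ∨ (0 ≤ firstSign cs ∧ (firstSign cs).toNat < cs.length) := by
  induction cs with
  | nil => left; rfl
  | cons c cs ih =>
      by_cases hc : (c == '+' || c == '-') = true
      · right; simp [firstSign, hc]
      · simp only [firstSign, hc]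
        rcases ih with h | ⟨h0, hl⟩
        · simp [h]
        · have hne : firstSign cs ≠ -1 := by omega
          simp only [hne, if_false]
          right
          constructor
          · omega
          · simp only [List.length_cons]
            omega

theorem sidx_spec (cs : List Char) (s : Int) :
    sidx cs s = if firstSign cs = -1 then []
      else (s + firstSign cs) :: sidx (cs.drop ((firstSign cs).toNat + 1)) (s + firstSign cs + 1) := by
  induction cs generalizing s with
  | nil => simp [sidx_nil, firstSign]
  | cons c cs ih =>
      by_cases hc : (c == '+' || c == '-') = true
      · simp [sidx_cons, hc, firstSign]
      · rw [sidx_cons, ih]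
        rcases firstSign_cases cs with h | ⟨h0, hl⟩
        · simp [firstSign, hc, h]
        · have hne : firstSign cs ≠ -1 := by omega
          have harith : (firstSign (c :: cs)) = firstSign cs + 1 := by
            simp [firstSign, hc, hne]
          have hne2 : firstSign cs + 1 ≠ -1 := by omega
          rw [harith, if_neg hne, if_neg hc, List.nil_append, if_neg hne2]
          have hd : (firstSign cs + 1).toNat + 1 = ((firstSign cs).toNat + 1) + 1 := by omega
          rw [hd, List.drop_succ_cons]
          have e1 : s + 1 + firstSign cs = s + (firstSign cs + 1) := by omega
          rw [e1]

theorem sidx_eq_nil_iff (cs : List Char) (s : Int) :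
    sidx cs s = [] ↔ firstSign cs = -1 := by
  rw [sidx_spec]
  split <;> simp_all

theorem A_eq (location : String) :
    get_lat_and_long location =
      (if (sidx location.toList 0).length ≠ 2 then none
       else if (0:Int) ∉ sidx location.toList 0 ∨ (PySem.Str.len location - 1) ∈ sidx location.toList 0 then none
       else match sidx location.toList 0 with
         | [s0, s1] => some (PySem.Str.slice location (some s0) (some s1), PySem.Str.slice location (some s1) none)
         | _ => none) := by
  unfold get_lat_and_long
  rw [PySem.List.foldl_append_if (fun p : Int × Char => p.2 == '+' || p.2 == '-') (fun p => p.1)]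
  rfl

-- ===== VERDICT (by name: the statement is the Claim_ definition above) =====
theorem get_lat_and_long_spec : Claim_equal_get_lat_and_long := by
  intro location _
  unfold Spec_get_lat_and_long
  rw [A_eq]
  rcases hcs : location.toList with _ | ⟨c, rest⟩
  · simp [get_lat_and_long_alt, hcs, sidx_nil]
  · by_cases hc : (c == '+' || c == '-') = true
    · have hcne : ¬ (c ≠ '+' ∧ c ≠ '-') := by
        rcases Bool.or_eq_true_iff.mp hc with h | h <;> simp_all
      have htail : (PySem.Str.slice location (some 1) none).toList = rest := by
        simp [hcs, PySem.List.slice_from_one]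
      have hB : get_lat_and_long_alt location =
          (if firstSign rest = -1 then none
           else if PySem.Str.len (PySem.Str.slice location (some (firstSign rest + 1)) none) < 2
               ∨ firstSign ((PySem.Str.slice (PySem.Str.slice location (some (firstSign rest + 1)) none) (some 1) none).toList) ≠ -1 then none
           else some (PySem.Str.slice location none (some (firstSign rest + 1)),
                      PySem.Str.slice location (some (firstSign rest + 1)) none)) := by
        unfold get_lat_and_long_alt
        rw [hcs]
        simp only [htail, if_neg hcne]
      rw [hB]
      by_cases hk : firstSign rest = -1
      · -- only one sign: A sees signs = [0], B bails out on k = -1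
        have hS : sidx (c :: rest) 0 = [0] := by
          simp [sidx_cons, hc, (sidx_eq_nil_iff rest 1).mpr hk]
        rw [hS, if_pos hk]
        simp
      · rcases (firstSign_cases rest).resolve_left hk with ⟨hk0, hkl⟩
        set k := firstSign rest with hkdef
        have hT := sidx_spec rest 1
        rw [← hkdef, if_neg hk] at hT
        have hS : sidx (c :: rest) 0 = 0 :: (1 + k) :: sidx (rest.drop (k.toNat + 1)) (1 + k + 1) := by
          simp only [sidx_cons, if_pos hc, zero_add, hT, List.singleton_append]
        have hlon : (PySem.Str.slice location (some (k + 1)) none).toList = rest.drop k.toNat := by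
          rw [PySem.Str.toList_slice, PySem.Chars.slice_eq_listSlice, hcs,
            PySem.List.slice_from _ (by omega : (0:Int) ≤ k + 1)]
          have h1 : (k + 1).toNat = k.toNat + 1 := by omega
          rw [h1, List.drop_succ_cons]
        have hlon1 : (PySem.Str.slice (PySem.Str.slice location (some (k + 1)) none) (some 1) none).toList
            = rest.drop (k.toNat + 1) := by
          rw [PySem.Str.toList_slice, PySem.Chars.slice_eq_listSlice, PySem.List.slice_from_one, hlon,
            List.tail_drop]
        have hlonlen : PySem.Str.len (PySem.Str.slice location (some (k + 1)) none)
            = (rest.length : Int) - k.toNat := by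
          rw [PySem.Str.len_eq, hlon, List.length_drop]
          omega
        have hlen : PySem.Str.len location = (rest.length : Int) + 1 := by
          rw [PySem.Str.len_eq, hcs]; simp
        rw [if_neg hk, hlon1, hlonlen]
        by_cases hT2 : sidx (rest.drop (k.toNat + 1)) (1 + k + 1) = []
        · -- exactly two signs: both programs apply the same final boundary test
          have hfs2 : firstSign (rest.drop (k.toNat + 1)) = -1 :=
            (sidx_eq_nil_iff _ _).mp hT2
          rw [hS, hT2]
          have hkc : (k.toNat : Int) = k := Int.toNat_of_nonneg hk0
          have h2 : ¬ ([(0:Int), 1 + k].length ≠ 2) := by simp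
          rw [if_neg h2, hlen]
          have e : (rest.length : Int) + 1 - 1 = (rest.length : Int) := by omega
          rw [e]
          by_cases hb : (rest.length : Int) = 1 + k
          · rw [if_pos (Or.inr (by simp [hb])), if_pos (Or.inl (by omega))]
          · have hm : ¬ ((0:Int) ∉ [0, 1 + k] ∨ (rest.length : Int) ∈ [0, 1 + k]) := by
              push_neg
              refine ⟨by simp, ?_⟩
              simp only [List.mem_cons, List.not_mem_nil, or_false]
              push_neg
              exact ⟨by omega, hb⟩
            have hrhs : ¬ ((rest.length : Int) - (k.toNat : Int) < 2 ∨
                firstSign (rest.drop (k.toNat + 1)) ≠ -1) := by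
              push_neg
              exact ⟨by omega, hfs2⟩
            rw [if_neg hm, if_neg hrhs]
            show some (PySem.Str.slice location (some 0) (some (1 + k)),
                  PySem.Str.slice location (some (1 + k)) none) = _
            have e1 : (1 : Int) + k = k + 1 := by omega
            rw [e1]
            simp [PySem.Str.slice]
        · -- a third sign exists: both return none
          have hfs2 : firstSign (rest.drop (k.toNat + 1)) ≠ -1 := by
            intro h; exact hT2 ((sidx_eq_nil_iff _ _).mpr h)
          have hlenS : (0 :: (1 + k) :: sidx (rest.drop (k.toNat + 1)) (1 + k + 1)).length ≠ 2 := by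
            simp only [List.length_cons]
            have := List.length_pos_iff.mpr hT2
            omega
          rw [hS, if_pos hlenS, if_pos (Or.inr hfs2)]
    · -- no sign at index 0: both return none
      have hcne : (c ≠ '+' ∧ c ≠ '-') := by
        constructor <;> (intro h; subst h; simp_all)
      have hS : sidx (c :: rest) 0 = sidx rest 1 := by
        simp [sidx_cons, hc]
      have h0 : (0:Int) ∉ sidx rest 1 := fun h => by have := mem_sidx_le h; omega
      have hB : get_lat_and_long_alt location = none := by
        unfold get_lat_and_long_alt
        rw [hcs]
        simp only [if_pos hcne]
      rw [hS, hB]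
      by_cases hl : (sidx rest 1).length ≠ 2
      · rw [if_pos hl]
      · rw [if_neg hl, if_pos (Or.inl h0)]
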